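-- pv_equiv track=rewrite | github.com/liskos/leletko | ege05/281.py | f
-- ===== SOURCE A (Python) =====
-- def f(n):
--     n = str(n)
--     s1, s2 = 0, 0
--     for i in range(len(n)):
--         if int(n[i]) % 2 == 0:
--             s1 += int(n[i])
--         if len(n) % 2 == 0:
--             if i % 2 == 1:
--                 s2 += int(n[i])
--         else:
--             if i % 2 == 0:
--                 s2 += int(n[i])
--     return abs(s1-s2)
-- ===== SOURCE B (Python) =====
-- def f(n):
--     s1 = 0
--     s2 = 0
--     take = True
--     m = n
--     while m > 0:
--         m, d = divmod(m, 10)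
--         if d % 2 == 0:
--             s1 += d
--         if take:
--             s2 += d
--         take = not take
--     return abs(s1 - s2)
-- ===== Notes on version B (the rewrite author's own statement) =====
-- stated objective: alternative
-- what changed: B drops the string conversion entirely: instead of walking str(n) with a per-iteration length-parity branch to pick alternating positions, it runs a divmod(m,10) loop over the digits from the units end with a flip-flop boolean, which makes the alternating-position sum branch-free with respect to the number's length.
import Mathlib
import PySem

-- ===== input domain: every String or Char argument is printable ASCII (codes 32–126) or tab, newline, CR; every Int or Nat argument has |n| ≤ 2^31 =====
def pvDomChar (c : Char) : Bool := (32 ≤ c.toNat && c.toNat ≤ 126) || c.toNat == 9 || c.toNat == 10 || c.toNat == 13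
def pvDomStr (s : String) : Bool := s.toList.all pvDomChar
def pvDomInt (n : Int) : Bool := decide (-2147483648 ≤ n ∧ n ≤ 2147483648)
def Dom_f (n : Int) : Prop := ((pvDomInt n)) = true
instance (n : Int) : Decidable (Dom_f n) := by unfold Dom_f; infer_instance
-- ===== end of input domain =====

-- B replaces A's string walk (with its per-iteration length-parity branch) by a pure
-- arithmetic divmod loop over the digits from the units end; return values only, no mutation.

-- ===== PORT A =====
-- int(one-character string), Python-exact; the `.getD 0` default is unreachable under Pre_f
-- (every character of str(n) for n ≥ 0 is a decimal digit, where ofChars? returns some).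
def chVal (c : Char) : Int := (PySem.Int.ofChars? [c]).getD 0

def f (n : Int) : Int :=
  let s := PySem.Int.toStr n
  let len : Int := PySem.Str.len s
  let r := (PySem.List.pyRange 0 len 1).foldl
    (fun (p : Int × Int) i =>
      let d := chVal ((PySem.Str.pyGet? s i).getD ' ')
      let s1 := if PySem.Int.mod d 2 = 0 then p.1 + d else p.1
      let s2 := if PySem.Int.mod len 2 = 0 then
                  (if PySem.Int.mod i 2 = 1 then p.2 + d else p.2)
                else
                  (if PySem.Int.mod i 2 = 0 then p.2 + d else p.2)
      (s1, s2)) (0, 0)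
  |r.1 - r.2|

-- ===== PORT B =====
-- the while-loop of Source B; divmod(m, 10) is exact here since 10 ≠ 0
def fAltLoop (m s1 s2 : Int) (take : Bool) : Int × Int :=
  if 0 < m then
    let q := PySem.Int.floordiv m 10
    let d := PySem.Int.mod m 10
    fAltLoop q (if PySem.Int.mod d 2 = 0 then s1 + d else s1)
      (if take then s2 + d else s2) (!take)
  else (s1, s2)
termination_by m.toNat
decreasing_by
  rw [PySem.Int.floordiv_eq_ediv_of_pos (by omega : (0:Int) < 10)]
  omega

def f_alt (n : Int) : Int :=
  let r := fAltLoop n 0 0 true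
  |r.1 - r.2|

-- ===== PRECONDITION & SPEC =====
-- Pre_f excludes exactly the negative n, on which A raises ValueError (int('-') while
-- scanning str(n)); it admits every input A returns on.
def Pre_f (n : Int) : Prop := 0 ≤ n
instance (n : Int) : Decidable (Pre_f n) := by unfold Pre_f; infer_instance
def pvWitness_f : Int := (2024)

def Spec_f (n : Int) (out : Int) : Prop := out = f_alt n
instance (n : Int) (out : Int) : Decidable (Spec_f n out) := by unfold Spec_f; infer_instance

-- ===== CLAIM (what is proved, stated in full; the proofs are below) =====
def Claim_equal_f : Prop := ∀ (n : Int), Dom_f n → Pre_f n → Spec_f n (f n)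

-- ===== LEMMAS AND PROOFS =====

-- sum of the even digit values of a digit-value list
def evenSum : List Int → Int
  | [] => 0
  | d :: ds => (if PySem.Int.mod d 2 = 0 then d else 0) + evenSum ds

-- alternating sum over a (reversed) digit-value list: add the head iff `t`
def altRev : List Int → Bool → Int
  | [], _ => 0
  | d :: ds, t => (if t then d else 0) + altRev ds (!t)

-- sum of entries at even index if `tgt`, at odd index otherwise
def selSum : List Int → Bool → Int
  | [], _ => 0
  | d :: ds, tgt => (if tgt then d else 0) + selSum ds (!tgt)

theorem chVal_digitChar (d : Nat) (h : d < 10) : chVal (Nat.digitChar d) = (d : Int) := by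
  interval_cases d <;> decide

theorem evenSum_append (xs : List Int) (d : Int) :
    evenSum (xs ++ [d]) = evenSum xs + (if PySem.Int.mod d 2 = 0 then d else 0) := by
  induction xs with
  | nil => simp [evenSum]
  | cons x xs ih => simp only [List.cons_append, evenSum, ih]; ring

theorem selSum_append (xs : List Int) (d : Int) : ∀ tgt : Bool,
    selSum (xs ++ [d]) tgt
      = selSum xs tgt + (if tgt = decide (xs.length % 2 = 0) then d else 0) := by
  induction xs with
  | nil => intro tgt; cases tgt <;> simp [selSum]
  | cons x xs ih =>
    intro tgt
    simp only [List.cons_append, selSum, ih (!tgt), List.length_cons]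
    have h2 : ((xs.length + 1) % 2 = 0) ↔ ¬ (xs.length % 2 = 0) := by omega
    by_cases hp : xs.length % 2 = 0 <;> cases tgt <;> simp [hp, h2] <;> ring

theorem altRev_reverse (ds : List Int) : ∀ b : Bool,
    altRev ds.reverse b = selSum ds (decide ((ds.length + (if b then 1 else 0)) % 2 = 0)) := by
  induction ds using List.reverseRecOn with
  | nil => intro b; simp [altRev, selSum]
  | append_singleton t c ih =>
    intro b
    rw [List.reverse_append]
    simp only [List.reverse_singleton, List.singleton_append, altRev, ih (!b),
      selSum_append, List.length_append, List.length_singleton]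
    cases b <;> by_cases hp : t.length % 2 = 0
    · have h1 : ((t.length + 1) % 2 = 0) = False := by simp; omega
      have h2 : ((t.length + 1 + 0) % 2 = 0) = False := by simp; omega
      simp [hp, h1, h2]
    · have h1 : ((t.length + 1) % 2 = 0) = True := by simp; omega
      have h2 : ((t.length + 1 + 0) % 2 = 0) = True := by simp; omega
      simp [hp, h1, h2]; try ring
    · have h1 : ((t.length + 0) % 2 = 0) = True := by simp [hp]
      have h2 : ((t.length + 1 + 1) % 2 = 0) = True := by simp; omega
      simp [hp, h1, h2]; try ring
    · have h1 : ((t.length + 0) % 2 = 0) = False := by simp [hp]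
      have h2 : ((t.length + 1 + 1) % 2 = 0) = False := by simp; omega
      simp [hp, h1, h2]; try ring

-- B's loop computes, on top of its accumulators, the even-digit sum and the
-- alternating sum (from the units digit) of str(m)'s digit values.
theorem fAltLoop_eq (m : Nat) : ∀ (s1 s2 : Int) (take : Bool),
    fAltLoop (m : Int) s1 s2 take
      = (s1 + evenSum ((Nat.toDigits 10 m).map chVal),
         s2 + altRev (((Nat.toDigits 10 m).map chVal).reverse) take) := by
  induction m using Nat.strong_induction_on with
  | _ m ih =>
    intro s1 s2 take
    by_cases h0 : m = 0
    · subst h0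
      rw [fAltLoop]
      have : ¬ (0:Int) < 0 := by omega
      have hc : chVal '0' = 0 := by decide
      simp only [this, if_false, Nat.toDigits_zero, List.map_cons, List.map_nil,
        List.reverse_singleton, evenSum, altRev, hc]
      cases take <;> simp [altRev]
    · rw [fAltLoop]
      have hpos : (0:Int) < (m:Nat) := by omega
      rw [if_pos hpos]
      have hmod : PySem.Int.mod ((m:Nat) : Int) 10 = ((m % 10 : Nat) : Int) := by
        exact_mod_cast PySem.Int.mod_natCast m 10
      have hdiv : PySem.Int.floordiv ((m:Nat) : Int) 10 = ((m / 10 : Nat) : Int) := by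
        exact_mod_cast PySem.Int.floordiv_natCast m 10
      simp only [hmod, hdiv]
      rw [Nat.toDigits_eq_if (by omega : 1 < 10)]
      by_cases h10 : m < 10
      · rw [if_pos h10]
        have hq : m / 10 = 0 := by omega
        have hmm : m % 10 = m := by omega
        rw [hq, hmm, fAltLoop]
        have : ¬ (0:Int) < ((0:Nat):Int) := by omega
        rw [if_neg this]
        simp only [List.map_cons, List.map_nil, List.reverse_singleton,
          chVal_digitChar m h10, evenSum, altRev]
        cases take <;> simp <;> (try split_ifs) <;> (try ring) <;> simp_all
      · rw [if_neg h10]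
        have hq : m / 10 < m := by omega
        rw [ih (m / 10) hq]
        simp only [List.map_append, List.map_cons, List.map_nil, List.reverse_append,
          List.reverse_singleton, List.singleton_append, altRev, evenSum_append,
          chVal_digitChar (m % 10) (by omega)]
        cases take <;> simp <;> (try split_ifs) <;> (try ring) <;> simp_all

-- A's fold over indices, in generic form: `want` selects even (true) or odd (false) indices.
theorem foldA_eq (cs : List Char) : ∀ (want : Bool) (a b : Int),
    (List.range cs.length).foldl
      (fun (p : Int × Int) j =>
        ((if PySem.Int.mod (chVal (cs[j]?.getD ' ')) 2 = 0 then p.1 + chVal (cs[j]?.getD ' ') else p.1),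
         (if decide (j % 2 = 0) = want then p.2 + chVal (cs[j]?.getD ' ') else p.2))) (a, b)
    = (a + evenSum (cs.map chVal), b + selSum (cs.map chVal) want) := by
  induction cs with
  | nil => intro want a b; simp [evenSum, selSum]
  | cons c cs ih =>
    intro want a b
    rw [List.length_cons, List.range_succ_eq_map, List.foldl_cons, List.foldl_map]
    have hfun : (fun (p : Int × Int) (j : Nat) =>
        ((if PySem.Int.mod (chVal ((c :: cs)[j.succ]?.getD ' ')) 2 = 0 then p.1 + chVal ((c :: cs)[j.succ]?.getD ' ') else p.1),
         (if decide (j.succ % 2 = 0) = want then p.2 + chVal ((c :: cs)[j.succ]?.getD ' ') else p.2)))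
      = (fun (p : Int × Int) (j : Nat) =>
        ((if PySem.Int.mod (chVal (cs[j]?.getD ' ')) 2 = 0 then p.1 + chVal (cs[j]?.getD ' ') else p.1),
         (if decide (j % 2 = 0) = (!want) then p.2 + chVal (cs[j]?.getD ' ') else p.2))) := by
      funext p j
      have hparity : (j.succ % 2 = 0) ↔ ¬ (j % 2 = 0) := by omega
      simp only [List.getElem?_cons_succ, hparity]
      cases want <;> simp
    rw [hfun, ih (!want)]
    simp only [List.map_cons, evenSum, selSum]
    cases want <;> simp <;> (try split_ifs) <;> (try ring) <;> simp_all

-- A's value, characterized through the digit-value list of str(m).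
theorem f_eq (m : Nat) :
    f (m : Int)
      = |evenSum ((Nat.toDigits 10 m).map chVal)
          - altRev (((Nat.toDigits 10 m).map chVal).reverse) true| := by
  have hchars : (PySem.Int.toStr (m : Int)).toList = Nat.toDigits 10 m := by
    rw [PySem.Int.toList_toStr]
    simp [PySem.Int.toChars]
  have hlen : PySem.Str.len (PySem.Int.toStr (m : Int)) = ((Nat.toDigits 10 m).length : Int) := by
    rw [PySem.Str.len_eq, hchars]
  have hmod2 : ∀ j : Nat, PySem.Int.mod (j : Int) 2 = ((j % 2 : Nat) : Int) := fun j => by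
    exact_mod_cast PySem.Int.mod_natCast j 2
  have hodd : ∀ j : Nat, (((j % 2 : Nat) : Int) = 1) ↔ (decide (j % 2 = 0) = false) := fun j => by
    rcases Nat.mod_two_eq_zero_or_one j with h | h <;> simp [h]
  have heven : ∀ j : Nat, (((j % 2 : Nat) : Int) = 0) ↔ (decide (j % 2 = 0) = true) := fun j => by
    rcases Nat.mod_two_eq_zero_or_one j with h | h <;> simp [h]
  have haltlen : ((Nat.toDigits 10 m).map chVal).length = (Nat.toDigits 10 m).length :=
    List.length_map ..
  by_cases hp : (Nat.toDigits 10 m).length % 2 = 0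
  · simp only [f, hlen, PySem.List.pyRange_zero_natCast, List.foldl_map,
      PySem.Str.pyGet?_natCast, hchars, hp, hmod2, hodd, Nat.cast_zero,
      eq_self_iff_true, if_true]
    rw [foldA_eq (Nat.toDigits 10 m) false 0 0]
    rw [altRev_reverse ((Nat.toDigits 10 m).map chVal) true, haltlen]
    have : (((Nat.toDigits 10 m).length + 1) % 2 = 0) = False := by simp; omega
    simp [this]
  · have hL1 : (Nat.toDigits 10 m).length % 2 = 1 := by omega
    simp only [f, hlen, PySem.List.pyRange_zero_natCast, List.foldl_map,
      PySem.Str.pyGet?_natCast, hchars, hL1, hmod2, heven, Nat.cast_one,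
      one_ne_zero, if_false]
    rw [foldA_eq (Nat.toDigits 10 m) true 0 0]
    rw [altRev_reverse ((Nat.toDigits 10 m).map chVal) true, haltlen]
    have : (((Nat.toDigits 10 m).length + 1) % 2 = 0) = True := by simp; omega
    simp [this]

-- ===== VERDICT (by name: the statement is the Claim_ definition above) =====
theorem f_spec : Claim_equal_f := by
  intro n _ hpre
  unfold Pre_f at hpre
  have hm : n = ((n.toNat : Nat) : Int) := by omega
  unfold Spec_f
  rw [hm, f_eq]
  show _ = (let r := fAltLoop ((n.toNat : Nat) : Int) 0 0 true; |r.1 - r.2|)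
  rw [fAltLoop_eq]
  simp
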